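-- pv_equiv track=rewrite | github.com/DomingosR/Leetcode-Problems | 2305-Fair-Distribution-of-Cookies.py | distributeCookies
-- ===== SOURCE A (Python) =====
-- def distributeCookies(cookies, k):
--     returnVal = [10**6]
--     cookieCount = [0] * k
--
--     def backtrack(cookieNumber, cookies, k):
--         if cookieNumber == len(cookies):
--             maxVal = max(cookieCount)
--             returnVal[0] = min(returnVal[0], maxVal)
--             return
--
--         for i in range(k):
--             cookieCount[i] += cookies[cookieNumber]
--             backtrack(cookieNumber + 1, cookies, k)
--             cookieCount[i] -= cookies[cookieNumber]
--             if cookieCount[i] == 0: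
--                 break
--
--     backtrack(0, cookies, k)
--     return returnVal[0]
-- ===== SOURCE B (Python) =====
-- def distributeCookies(cookies, k):
--     # Breadth-first frontier expansion over pruned assignment vectors (no recursion, no mutation of shared state).
--     frontier = [[0] * k]
--     for c in cookies:
--         nf = []
--         for counts in frontier:
--             cands = []
--             for j in range(k):
--                 cands.append(j)
--                 if counts[j] == 0:
--                     break
--             for j in cands:
--                 nc = list(counts)
--                 nc[j] += c
--                 nf.append(nc)
--         frontier = nf
--     best = 10 ** 6
--     for counts in frontier:
--         best = min(best, max(counts))
--     return best
-- ===== Notes on version B (the rewrite author's own statement) =====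
-- stated objective: alternative
-- what changed: A's recursive DFS backtracking with an in-place mutated counter array, a nonlocal running minimum and a loop-with-break is replaced by an iterative breadth-first expansion that materialises each level's frontier of pruned assignment vectors with an explicit declarative candidate list, then takes the min of maxima over the final frontier.
import Mathlib
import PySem

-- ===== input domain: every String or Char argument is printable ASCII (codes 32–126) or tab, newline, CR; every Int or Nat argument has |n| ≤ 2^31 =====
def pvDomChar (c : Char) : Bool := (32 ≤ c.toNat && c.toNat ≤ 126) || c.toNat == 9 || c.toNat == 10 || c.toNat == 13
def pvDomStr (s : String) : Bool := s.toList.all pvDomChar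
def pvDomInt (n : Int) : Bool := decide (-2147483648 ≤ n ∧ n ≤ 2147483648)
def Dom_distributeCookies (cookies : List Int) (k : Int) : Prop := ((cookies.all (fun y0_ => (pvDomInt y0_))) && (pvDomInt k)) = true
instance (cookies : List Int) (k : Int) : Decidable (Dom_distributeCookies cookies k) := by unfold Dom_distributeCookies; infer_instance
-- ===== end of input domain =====

-- B replaces A's recursive DFS backtracking (shared mutable counter array, nonlocal running minimum,
-- loop-with-break) by an iterative breadth-first frontier expansion of the same pruned assignment
-- vectors, taking the min of maxima at the end; same asymptotic cost, no recursion ("alternative").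


-- ===== PORT A =====
-- max(xs): Python raises on []; the .getD 0 default is only reachable outside Pre_ (cookies = [] ∧ k ≤ 0)
def pvMax (xs : List Int) : Int := (PySem.List.max? xs (fun y => y)).getD 0

-- cookieCount[i] += c  (i taken from range(k), always in range)
def pvBump (counts : List Int) (i : Int) (c : Int) : List Int :=
  counts.set i.toNat (PySem.List.pyGetD counts i 0 + c)

-- backtrack: the mutation is undone after each recursive call, so counts is threaded unchanged;
-- the for-loop with `break` is a foldl over range(k) carrying (returnVal, broken) state.
def pvBacktrack (k : Int) : List Int → List Int → Int → Int
  | [], counts, rv => min rv (pvMax counts)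
  | c :: rest, counts, rv =>
    ((PySem.List.pyRange 0 k 1).foldl
      (fun (s : Int × Bool) i =>
        if s.2 then s
        else (pvBacktrack k rest (pvBump counts i c) s.1,
              PySem.List.pyGetD counts i 0 == 0))
      (rv, false)).1

def distributeCookies (cookies : List Int) (k : Int) : Int :=
  pvBacktrack k cookies (PySem.List.pyRepeat [0] k) (10 ^ 6)

-- ===== PORT B =====
-- candidates for the next cookie: indices of range(k) up to and including the first child whose count is 0
def pvCands (counts : List Int) : List Int → List Int
  | [] => []
  | j :: js => j :: (if PySem.List.pyGetD counts j 0 == 0 then [] else pvCands counts js)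

-- all successor count-vectors of one frontier element
def pvSuccs (k c : Int) (counts : List Int) : List (List Int) :=
  (pvCands counts (PySem.List.pyRange 0 k 1)).map (fun j => pvBump counts j c)

def distributeCookies_alt (cookies : List Int) (k : Int) : Int :=
  let frontier := cookies.foldl (fun fr c => fr.flatMap (pvSuccs k c)) [PySem.List.pyRepeat [0] k]
  frontier.foldl (fun b counts => min b (pvMax counts)) (10 ^ 6)

-- ===== PRECONDITION & SPEC =====
-- Python A raises ValueError (max of empty list) exactly when cookies = [] and k ≤ 0 ([0]*k is empty); B raises there too.
def Pre_distributeCookies (cookies : List Int) (k : Int) : Prop := ¬ (cookies = [] ∧ k ≤ 0)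
instance (cookies : List Int) (k : Int) : Decidable (Pre_distributeCookies cookies k) := by unfold Pre_distributeCookies; infer_instance
def pvWitness_distributeCookies : List Int × Int := ([1, 2, 3], 2)

def Spec_distributeCookies (cookies : List Int) (k : Int) (out : Int) : Prop := out = distributeCookies_alt cookies k
instance (cookies : List Int) (k : Int) (out : Int) : Decidable (Spec_distributeCookies cookies k out) := by unfold Spec_distributeCookies; infer_instance

-- ===== CLAIM (what is proved, stated in full; the proofs are below) =====
def Claim_equal_distributeCookies : Prop := ∀ (cookies : List Int) (k : Int), Dom_distributeCookies cookies k → Pre_distributeCookies cookies k → Spec_distributeCookies cookies k (distributeCookies cookies k)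

-- ===== LEMMAS AND PROOFS =====

-- leaves of the pruned search tree rooted at `counts`
def pvLeaves (k : Int) : List Int → List Int → List (List Int)
  | [], counts => [counts]
  | c :: rest, counts => (pvSuccs k c counts).flatMap (pvLeaves k rest)

-- once the break flag is set, the fold is frozen
theorem pvFold_frozen (f : Int × Bool → Int → Int × Bool)
    (hf : ∀ s i, s.2 = true → f s i = s)
    (is : List Int) (s : Int × Bool) (hs : s.2 = true) :
    is.foldl f s = s := by
  induction is generalizing s with
  | nil => rfl
  | cons j js ih => simp only [List.foldl, hf s j hs]; exact ih s hs

-- A's loop-with-break over `is` = plain fold of the recursive calls over the pvCands prefix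
theorem pvBreak_eq_cands (k c : Int) (rest counts : List Int) (is : List Int) (rv : Int) :
    (is.foldl
      (fun (s : Int × Bool) i =>
        if s.2 then s
        else (pvBacktrack k rest (pvBump counts i c) s.1,
              PySem.List.pyGetD counts i 0 == 0))
      (rv, false)).1
    = (pvCands counts is).foldl (fun r j => pvBacktrack k rest (pvBump counts j c) r) rv := by
  induction is generalizing rv with
  | nil => rfl
  | cons j js ih =>
    simp only [List.foldl, pvCands, if_neg (by simp : ¬ ((rv, false) : Int × Bool).2 = true)]
    by_cases h : PySem.List.pyGetD counts j 0 == 0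
    · rw [if_pos h]
      rw [pvFold_frozen _ (fun s i hs => by simp [hs]) js _ (by simp [h])]
      simp
    · rw [if_neg h]
      simp only [h]
      exact ih _

-- A's DFS with running minimum = fold of min∘max over the leaves
theorem pvBacktrack_eq_leaves (k : Int) (remaining : List Int) :
    ∀ counts rv, pvBacktrack k remaining counts rv
      = (pvLeaves k remaining counts).foldl (fun b cs => min b (pvMax cs)) rv := by
  induction remaining with
  | nil => intro counts rv; rfl
  | cons c rest ih =>
    intro counts rv
    show ((PySem.List.pyRange 0 k 1).foldl _ (rv, false)).1 = _
    rw [pvBreak_eq_cands]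
    simp only [pvLeaves, pvSuccs, List.flatMap_map, List.foldl_flatMap]
    apply PySem.List.foldl_congr_mem
    intro r j _
    exact ih (pvBump counts j c) r

-- BFS frontier expansion = flatMap of the leaves
theorem pvFrontier_eq_leaves (k : Int) (cookies : List Int) :
    ∀ fr : List (List Int),
      cookies.foldl (fun fr c => fr.flatMap (pvSuccs k c)) fr
        = fr.flatMap (pvLeaves k cookies) := by
  induction cookies with
  | nil => intro fr; simp [pvLeaves]
  | cons c rest ih =>
    intro fr
    simp only [List.foldl, ih (fr.flatMap (pvSuccs k c)), List.flatMap_assoc]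
    rfl

-- ===== VERDICT (by name: the statement is the Claim_ definition above) =====
theorem distributeCookies_spec : Claim_equal_distributeCookies := by
  intro cookies k _ _
  unfold Spec_distributeCookies distributeCookies distributeCookies_alt
  rw [pvBacktrack_eq_leaves, pvFrontier_eq_leaves]
  simp
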